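-- pv_equiv track=rewrite | github.com/intoro/ManuelBastioniLab | manuelbastionilab/skeletonengine.py | filter_chains_by_max_length
-- ===== SOURCE A (Python) =====
-- def filter_chains_by_max_length(chains):
--     longer_chains = []
--     max_length = 0
--
--     for chain in chains:
--         max_length = max(max_length,len(chain))
--
--     for chain in chains:
--         if len(chain) == max_length:
--             longer_chains.append(chain)
--     return longer_chains
-- ===== SOURCE B (Python) =====
-- def filter_chains_by_max_length(chains):
--     max_length = 0
--     result = []
--     for chain in chains:
--         n = len(chain)
--         if n > max_length:
--             max_length = n
--             result = [chain]
--         elif n == max_length: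
--             result.append(chain)
--     return result
-- ===== Notes on version B (the rewrite author's own statement) =====
-- stated objective: alternative
-- what changed: Replaced A's two passes (one to find the max length, one to filter) with a single pass that maintains the running max and resets/extends the result list as it goes.
import Mathlib
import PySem

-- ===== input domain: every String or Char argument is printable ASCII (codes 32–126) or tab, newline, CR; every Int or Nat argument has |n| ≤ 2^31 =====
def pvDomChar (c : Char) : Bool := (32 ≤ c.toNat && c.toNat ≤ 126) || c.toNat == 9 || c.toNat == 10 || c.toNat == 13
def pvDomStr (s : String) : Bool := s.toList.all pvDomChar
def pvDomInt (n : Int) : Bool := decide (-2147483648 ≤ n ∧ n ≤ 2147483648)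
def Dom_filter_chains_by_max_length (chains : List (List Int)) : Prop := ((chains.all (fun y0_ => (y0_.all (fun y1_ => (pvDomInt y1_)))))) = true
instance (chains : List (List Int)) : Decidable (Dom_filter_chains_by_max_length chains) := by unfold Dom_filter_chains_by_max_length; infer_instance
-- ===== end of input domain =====

-- B collapses A's two passes into one scan maintaining a running max and the result list (alternative single-pass decomposition; same return value).

set_option maxRecDepth 4000


-- ===== PORT A =====
def filter_chains_by_max_length (chains : List (List Int)) : List (List Int) :=
  let max_length : Int := chains.foldl (fun m chain => max m (chain.length : Int)) 0
  chains.foldl (fun longer_chains chain =>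
    if (chain.length : Int) = max_length then longer_chains ++ [chain] else longer_chains) []

-- ===== PORT B =====
-- one step of B's loop body
def pvStepB (s : Int × List (List Int)) (chain : List Int) : Int × List (List Int) :=
  let n : Int := chain.length
  if n > s.1 then (n, [chain])
  else if n = s.1 then (s.1, s.2 ++ [chain])
  else s

def filter_chains_by_max_length_alt (chains : List (List Int)) : List (List Int) :=
  (chains.foldl pvStepB (0, [])).2

-- ===== PRECONDITION & SPEC =====
def Spec_filter_chains_by_max_length (chains : List (List Int)) (out : List (List Int)) : Prop := out = filter_chains_by_max_length_alt chains
instance (chains : List (List Int)) (out : List (List Int)) : Decidable (Spec_filter_chains_by_max_length chains out) := by unfold Spec_filter_chains_by_max_length; infer_instance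

-- ===== CLAIM (what is proved, stated in full; the proofs are below) =====
def Claim_equal_filter_chains_by_max_length : Prop := ∀ (chains : List (List Int)), Dom_filter_chains_by_max_length chains → Spec_filter_chains_by_max_length chains (filter_chains_by_max_length chains)

-- ===== LEMMAS AND PROOFS =====

-- running maximum over lengths, starting at m
def pvMaxLen (m : Int) (l : List (List Int)) : Int :=
  l.foldl (fun m chain => max m (chain.length : Int)) m

lemma pvMaxLen_cons (m : Int) (c : List Int) (l : List (List Int)) :
    pvMaxLen m (c :: l) = pvMaxLen (max m (c.length : Int)) l := rfl

lemma le_pvMaxLen (m : Int) (l : List (List Int)) : m ≤ pvMaxLen m l := by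
  induction l generalizing m with
  | nil => simp [pvMaxLen]
  | cons c l ih =>
    rw [pvMaxLen_cons]
    exact le_trans (le_max_left _ _) (ih _)

-- A's second loop is a filter
lemma foldl_filter (M : Int) (l : List (List Int)) (a : List (List Int)) :
    l.foldl (fun acc chain => if (chain.length : Int) = M then acc ++ [chain] else acc) a
      = a ++ l.filter (fun chain => (chain.length : Int) = M) := by
  induction l generalizing a with
  | nil => simp
  | cons c l ih =>
    by_cases h : (c.length : Int) = M <;> simp [List.foldl, h, ih]

-- step lemmas for B's loop body
lemma pvStepB_gt (m : Int) (acc : List (List Int)) (c : List Int)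
    (h : (c.length : Int) > m) : pvStepB (m, acc) c = ((c.length : Int), [c]) := by
  simp [pvStepB, h]

lemma pvStepB_eq (m : Int) (acc : List (List Int)) (c : List Int)
    (h : (c.length : Int) = m) : pvStepB (m, acc) c = (m, acc ++ [c]) := by
  simp [pvStepB, h]

lemma pvStepB_lt (m : Int) (acc : List (List Int)) (c : List Int)
    (h : (c.length : Int) < m) : pvStepB (m, acc) c = (m, acc) := by
  have h1 : ¬ ((c.length : Int) > m) := by omega
  have h2 : ¬ ((c.length : Int) = m) := by omega
  simp [pvStepB, h1, h2]

-- B's single pass, characterized against the running max and the filter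
lemma bfold_spec (l : List (List Int)) (m : Int) (acc : List (List Int)) :
    (l.foldl pvStepB (m, acc)).2
    = (if m = pvMaxLen m l then acc else [])
        ++ l.filter (fun chain => (chain.length : Int) = pvMaxLen m l) := by
  induction l generalizing m acc with
  | nil => simp [pvMaxLen]
  | cons c l ih =>
    rw [pvMaxLen_cons, List.foldl_cons]
    rcases lt_trichotomy m (c.length : Int) with hgt | heq | hlt
    · have hmax : max m (c.length : Int) = (c.length : Int) := max_eq_right (le_of_lt hgt)
      have hne : m ≠ pvMaxLen ((c.length : Int)) l := by
        have := le_pvMaxLen (c.length : Int) l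
        omega
      rw [pvStepB_gt m acc c hgt, ih, hmax, List.filter_cons]
      simp only [decide_eq_true_eq]
      rw [if_neg hne]
      by_cases hc : (c.length : Int) = pvMaxLen (c.length : Int) l
      · rw [if_pos hc, if_pos hc]; simp
      · rw [if_neg hc, if_neg hc]
    · have hmax : max m (c.length : Int) = m := by omega
      rw [pvStepB_eq m acc c heq.symm, ih, hmax, List.filter_cons]
      simp only [decide_eq_true_eq]
      by_cases hm : m = pvMaxLen m l
      · have hc : (c.length : Int) = pvMaxLen m l := heq.symm.trans hm
        rw [if_pos hm, if_pos hm, if_pos hc]; simp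
      · have hc : ¬ ((c.length : Int) = pvMaxLen m l) := fun h => hm (heq.trans h)
        rw [if_neg hm, if_neg hm, if_neg hc]
    · have hmax : max m (c.length : Int) = m := by omega
      rw [pvStepB_lt m acc c hlt, ih, hmax, List.filter_cons]
      simp only [decide_eq_true_eq]
      have hc : ¬ ((c.length : Int) = pvMaxLen m l) := by
        have := le_pvMaxLen m l; omega
      rw [if_neg hc]

-- ===== VERDICT (by name: the statement is the Claim_ definition above) =====
theorem filter_chains_by_max_length_spec : Claim_equal_filter_chains_by_max_length := by
  intro chains _
  unfold Spec_filter_chains_by_max_length filter_chains_by_max_length filter_chains_by_max_length_alt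
  rw [foldl_filter, bfold_spec]
  by_cases h0 : (0 : Int) = pvMaxLen 0 chains
  · rw [if_pos h0]; rfl
  · rw [if_neg h0]; rfl
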